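-- pv_equiv track=rewrite | github.com/Harshit242005/Internship | array/max continous subarray product.py | find
-- ===== SOURCE A (Python) =====
-- def find(arr, size, start, new_value, product, value):
--     if start > size:
--         max_pair = max(new_value.items(), key=lambda x: x[0])
--
-- # print the maximum key-value pair
--         return max_pair
--     if arr[start] > 0:
--         value.append(arr[start])
--         product *= arr[start]
--         i = start+1
--         while(i <= size and arr[i] > 0):
--             product *= arr[i]
--             value.append(arr[i])
--             i += 1
--         start = i
--         new_value[product] = value
--         product = 1
--         value = []
--         return find(arr, size, start, new_value, product, value)
--     else:
--         product = 1
--         value = []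
--         return find(arr, size, start+1, new_value, product, value)
-- ===== SOURCE B (Python) =====
-- def find(arr, size, start, new_value, product, value):
--     in_run = False
--     for i in range(start, size + 1):
--         x = arr[i]
--         if x > 0:
--             product *= x
--             value.append(x)
--             in_run = True
--         elif in_run:
--             new_value[product] = value
--             product, value, in_run = 1, [], False
--         else:
--             product, value = 1, []
--     if in_run:
--         new_value[product] = value
--     return max(new_value.items(), key=lambda kv: kv[0])
-- ===== Notes on version B (the rewrite author's own statement) =====
-- stated objective: simpler
-- what changed: A's tail recursion (one recursive call per positive run and per non-positive element, with an inner while loop) is replaced by a single iterative for-loop over range(start, size+1) carrying an in_run flag, with one flush after the loop.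
import Mathlib
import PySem

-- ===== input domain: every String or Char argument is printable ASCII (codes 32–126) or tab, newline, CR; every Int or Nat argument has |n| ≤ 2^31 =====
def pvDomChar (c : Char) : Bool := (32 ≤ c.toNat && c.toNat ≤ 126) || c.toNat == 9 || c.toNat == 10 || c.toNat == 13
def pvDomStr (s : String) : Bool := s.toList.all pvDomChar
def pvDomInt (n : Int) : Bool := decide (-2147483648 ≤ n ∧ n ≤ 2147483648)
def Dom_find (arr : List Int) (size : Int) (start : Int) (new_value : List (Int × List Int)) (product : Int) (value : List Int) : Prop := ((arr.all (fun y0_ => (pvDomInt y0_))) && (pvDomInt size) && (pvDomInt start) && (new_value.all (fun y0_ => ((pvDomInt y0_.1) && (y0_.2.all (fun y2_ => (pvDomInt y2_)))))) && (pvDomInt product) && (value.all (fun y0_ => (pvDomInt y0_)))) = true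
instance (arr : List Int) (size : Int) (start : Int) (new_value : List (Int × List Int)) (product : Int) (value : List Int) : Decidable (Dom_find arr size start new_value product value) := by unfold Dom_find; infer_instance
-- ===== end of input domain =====

-- B replaces A's tail recursion (one call per positive run and per non-positive element, with an
-- inner while loop) by a single iterative forward scan with an in_run flag; return values agree,
-- and the equivalence proved here is about the RETURN value only (both Pythons mutate `value`
-- and `new_value` in place).

-- ===== PORT A =====

-- shared helper: Python's `max(d.items(), key=lambda x: x[0])`, called identically by both
-- Pythons (the `.getD` default is only reached on an empty dict, which Pre_find excludes).
def pyMaxPair (d : List (Int × List Int)) : Int × List Int :=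
  (PySem.List.max? d (fun kv => kv.1)).getD (0, [])

-- shared helper: Python's `new_value[product] = value` on the dict (both Pythons do it).
def dinsert (d : List (Int × List Int)) (k : Int) (v : List Int) : List (Int × List Int) :=
  ((PySem.Dict.mk d).insert k v).items

-- A's inner `while i <= size and arr[i] > 0` loop, one fuel unit per iteration (the fuel only
-- makes the loop total; the wrapper below supplies enough of it, so it never cuts the loop short).
-- (The `none` branch is where Python raises IndexError; Pre_find keeps it unreachable.)
def findRunF (arr : List Int) (size : Int) :
    Nat → Int → Int → List Int → Int × Int × List Int
  | 0, i, product, value => (i, product, value)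
  | fuel + 1, i, product, value =>
    if i ≤ size then
      match PySem.List.pyGet? arr i with
      | some x =>
          if 0 < x then findRunF arr size fuel (i + 1) (product * x) (value ++ [x])
          else (i, product, value)
      | none => (i, product, value)
    else (i, product, value)

def findRun (arr : List Int) (size : Int) (i : Int) (product : Int) (value : List Int) :
    Int × Int × List Int :=
  findRunF arr size (size + 1 - i).toNat i product value

-- A's recursion, one fuel unit per recursive call (again the wrapper supplies enough fuel:
-- fuel = 0 implies start > size, so the 0-case is the same `start > size` exit).
def findF (arr : List Int) (size : Int) :
    Nat → Int → List (Int × List Int) → Int → List Int → Int × List Int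
  | 0, _, nv, _, _ => pyMaxPair nv
  | fuel + 1, start, nv, p, v =>
    if start > size then pyMaxPair nv
    else
      match PySem.List.pyGet? arr start with
      | some x =>
          if 0 < x then
            let r := findRun arr size (start + 1) (p * x) (v ++ [x])
            findF arr size fuel r.1 (dinsert nv r.2.1 r.2.2) 1 []
          else findF arr size fuel (start + 1) nv 1 []
      | none => (0, [])   -- Python raises IndexError here; excluded by Pre_find
def find (arr : List Int) (size : Int) (start : Int) (new_value : List (Int × List Int))
    (product : Int) (value : List Int) : Int × List Int :=
  findF arr size (size + 1 - start).toNat start new_value product value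

-- ===== PORT B =====

-- one step of B's `for i in range(start, size+1)` body, carrying (new_value, product, value, in_run)
def stepB (arr : List Int) (st : List (Int × List Int) × Int × List Int × Bool) (i : Int) :
    List (Int × List Int) × Int × List Int × Bool :=
  match PySem.List.pyGet? arr i with
  | some x =>
      if 0 < x then (st.1, st.2.1 * x, st.2.2.1 ++ [x], true)
      else if st.2.2.2 then (dinsert st.1 st.2.1 st.2.2.1, 1, [], false)
      else (st.1, 1, [], st.2.2.2)
  | none => st   -- Python raises IndexError here; excluded by Pre_find

def find_alt (arr : List Int) (size : Int) (start : Int) (new_value : List (Int × List Int))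
    (product : Int) (value : List Int) : Int × List Int :=
  let s := (PySem.List.pyRange start (size + 1) 1).foldl (stepB arr) (new_value, product, value, false)
  let d := if s.2.2.2 then dinsert s.1 s.2.1 s.2.2.1 else s.1
  pyMaxPair d

-- ===== PRECONDITION & SPEC =====
-- Pre_find is exactly where the Python A returns normally: every index scanned (start..size,
-- Python semantics, negative indices wrap) must be a valid index, and the final dict must be
-- non-empty (it is empty — max raises ValueError — iff new_value is empty and no scanned
-- element is positive).
def Pre_find (arr : List Int) (size : Int) (start : Int) (new_value : List (Int × List Int)) (product : Int) (value : List Int) : Prop :=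
  (start ≤ size → -(arr.length : Int) ≤ start ∧ size < (arr.length : Int))
  ∧ (new_value ≠ [] ∨
      ((PySem.List.pyRange start (size + 1) 1).any
        (fun i => decide (0 < (PySem.List.pyGet? arr i).getD 0))) = true)
instance (arr : List Int) (size : Int) (start : Int) (new_value : List (Int × List Int)) (product : Int) (value : List Int) : Decidable (Pre_find arr size start new_value product value) := by unfold Pre_find; infer_instance

def pvWitness_find : List Int × Int × Int × (List (Int × List Int)) × Int × List Int :=
  ([2, 3, -1, 4], 3, 0, [], 1, [])

def Spec_find (arr : List Int) (size : Int) (start : Int) (new_value : List (Int × List Int)) (product : Int) (value : List Int) (out : Int × List Int) : Prop := out = find_alt arr size start new_value product value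
instance (arr : List Int) (size : Int) (start : Int) (new_value : List (Int × List Int)) (product : Int) (value : List Int) (out : Int × List Int) : Decidable (Spec_find arr size start new_value product value out) := by unfold Spec_find; infer_instance

-- ===== CLAIM (what is proved, stated in full; the proofs are below) =====
def Claim_equal_find : Prop := ∀ (arr : List Int) (size : Int) (start : Int) (new_value : List (Int × List Int)) (product : Int) (value : List Int), Dom_find arr size start new_value product value → Pre_find arr size start new_value product value → Spec_find arr size start new_value product value (find arr size start new_value product value)

-- ===== LEMMAS AND PROOFS =====

-- every index in the scanned window is a valid Python index
theorem pyGet?_some_of_bounds (xs : List Int) (i : Int) (h1 : -(xs.length : Int) ≤ i)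
    (h2 : i < (xs.length : Int)) : ∃ x, PySem.List.pyGet? xs i = some x := by
  simp only [PySem.List.pyGet?, PySem.List.pyIdx?]
  split_ifs with h
  · exact ⟨xs[i.toNat], by
      simp only [Option.bind_eq_some_iff]
      exact ⟨i.toNat, rfl, List.getElem?_eq_getElem (by omega)⟩⟩
  · exact ⟨xs[xs.length - (-i).toNat]'(by omega), by
      simp only [Option.bind_eq_some_iff]
      exact ⟨xs.length - (-i).toNat, by simp, List.getElem?_eq_getElem (by omega)⟩⟩

-- any sufficient fuel computes findRun (the wrapper's fuel is exact)
theorem findRunF_eq_findRun (arr : List Int) (size : Int) :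
    ∀ (fuel : Nat) (i p : Int) (v : List Int), (size + 1 - i).toNat ≤ fuel →
      findRunF arr size fuel i p v = findRun arr size i p v := by
  intro fuel
  induction fuel with
  | zero =>
      intro i p v h
      rw [findRun, show (size + 1 - i).toNat = 0 by omega]
  | succ fuel ih =>
      intro i p v h
      by_cases hle : i ≤ size
      · rw [findRun, show (size + 1 - i).toNat = (size - i).toNat + 1 by omega]
        show findRunF arr size (fuel + 1) i p v = findRunF arr size ((size - i).toNat + 1) i p v
        rw [findRunF, findRunF]
        simp only [if_pos hle]
        cases hget : PySem.List.pyGet? arr i with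
        | none => rfl
        | some x =>
            by_cases hpos : 0 < x
            · simp only [if_pos hpos]
              rw [ih (i + 1) (p * x) (v ++ [x]) (by omega)]
              rw [show (size - i).toNat = (size + 1 - (i + 1)).toNat by omega]
              rfl
            · simp only [if_neg hpos]
      · rw [findRun, show (size + 1 - i).toNat = 0 by omega, findRunF, findRunF, if_neg hle]

-- the unfolding equations of A's inner while loop (Pre_find rules out the IndexError case)
theorem findRun_stop (arr : List Int) (size i p : Int) (v : List Int) (hle : ¬ i ≤ size) :
    findRun arr size i p v = (i, p, v) := by
  rw [findRun, show (size + 1 - i).toNat = 0 by omega, findRunF]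
theorem findRun_neg (arr : List Int) (size i p : Int) (v : List Int) (x : Int) (hle : i ≤ size)
    (hget : PySem.List.pyGet? arr i = some x) (hpos : ¬ 0 < x) :
    findRun arr size i p v = (i, p, v) := by
  rw [findRun, show (size + 1 - i).toNat = (size - i).toNat + 1 by omega, findRunF]
  simp [hle, hget, hpos]
theorem findRun_pos (arr : List Int) (size i p : Int) (v : List Int) (x : Int) (hle : i ≤ size)
    (hget : PySem.List.pyGet? arr i = some x) (hpos : 0 < x) :
    findRun arr size i p v = findRun arr size (i + 1) (p * x) (v ++ [x]) := by
  conv_lhs => rw [findRun, show (size + 1 - i).toNat = (size - i).toNat + 1 by omega, findRunF]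
  simp only [if_pos hle, hget, if_pos hpos]
  exact findRunF_eq_findRun arr size (size - i).toNat (i + 1) (p * x) (v ++ [x]) (by omega)

-- the while loop only moves i forward
theorem findRunF_ge (arr : List Int) (size : Int) :
    ∀ (fuel : Nat) (i p : Int) (v : List Int), i ≤ (findRunF arr size fuel i p v).1 := by
  intro fuel
  induction fuel with
  | zero => intro i p v; simp [findRunF]
  | succ fuel ih =>
      intro i p v
      rw [findRunF]
      split_ifs with hle
      · cases hget : PySem.List.pyGet? arr i with
        | none => simp
        | some x =>
            by_cases hpos : 0 < x
            · simp only [if_pos hpos]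
              have := ih (i + 1) (p * x) (v ++ [x]); omega
            · simp [hpos]
      · simp

theorem findRun_ge (arr : List Int) (size i p : Int) (v : List Int) :
    i ≤ (findRun arr size i p v).1 :=
  findRunF_ge arr size _ i p v

-- any sufficient fuel computes find (the 0-case only fires when start > size)
theorem findF_eq_find (arr : List Int) (size : Int) :
    ∀ (fuel : Nat) (start : Int) (nv : List (Int × List Int)) (p : Int) (v : List Int),
      (size + 1 - start).toNat ≤ fuel →
      findF arr size fuel start nv p v = find arr size start nv p v := by
  intro fuel
  induction fuel using Nat.strong_induction_on with
  | _ fuel ih =>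
    intro start nv p v h
    by_cases hgt : start > size
    · rw [find, show (size + 1 - start).toNat = 0 by omega]
      cases fuel with
      | zero => rfl
      | succ f => show (if start > size then pyMaxPair nv else _) = _; rw [if_pos hgt]; rfl
    · obtain ⟨f, rfl⟩ : ∃ f, fuel = f + 1 := ⟨fuel - 1, by omega⟩
      rw [find, show (size + 1 - start).toNat = (size - start).toNat + 1 by omega]
      show findF arr size (f + 1) start nv p v = findF arr size ((size - start).toNat + 1) start nv p v
      rw [findF, findF]
      simp only [if_neg hgt]
      cases hget : PySem.List.pyGet? arr start with
      | none => rfl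
      | some x =>
          by_cases hpos : 0 < x
          · simp only [if_pos hpos]
            have hge := findRun_ge arr size (start + 1) (p * x) (v ++ [x])
            rw [ih f (by omega) _ _ _ _ (by omega),
              ih (size - start).toNat (by omega) _ _ _ _ (by omega)]
          · simp only [if_neg hpos]
            rw [ih f (by omega) _ _ _ _ (by omega),
              ih (size - start).toNat (by omega) _ _ _ _ (by omega)]

-- the three unfolding equations of A's recursion
theorem find_stop (arr : List Int) (size start : Int) (nv : List (Int × List Int)) (p : Int)
    (v : List Int) (hgt : start > size) : find arr size start nv p v = pyMaxPair nv := by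
  rw [find, show (size + 1 - start).toNat = 0 by omega, findF]
theorem find_pos (arr : List Int) (size start : Int) (nv : List (Int × List Int)) (p : Int)
    (v : List Int) (x : Int) (hgt : ¬ start > size) (hget : PySem.List.pyGet? arr start = some x)
    (hpos : 0 < x) :
    find arr size start nv p v =
      find arr size (findRun arr size (start + 1) (p * x) (v ++ [x])).1
        (dinsert nv (findRun arr size (start + 1) (p * x) (v ++ [x])).2.1
          (findRun arr size (start + 1) (p * x) (v ++ [x])).2.2) 1 [] := by
  conv_lhs => rw [find, show (size + 1 - start).toNat = (size - start).toNat + 1 by omega, findF]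
  simp only [if_neg hgt, hget, if_pos hpos]
  have hge := findRun_ge arr size (start + 1) (p * x) (v ++ [x])
  exact findF_eq_find arr size (size - start).toNat _ _ _ _ (by omega)
theorem find_neg (arr : List Int) (size start : Int) (nv : List (Int × List Int)) (p : Int)
    (v : List Int) (x : Int) (hgt : ¬ start > size) (hget : PySem.List.pyGet? arr start = some x)
    (hpos : ¬ 0 < x) :
    find arr size start nv p v = find arr size (start + 1) nv 1 [] := by
  conv_lhs => rw [find, show (size + 1 - start).toNat = (size - start).toNat + 1 by omega, findF]
  simp only [if_neg hgt, hget, if_neg hpos]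
  exact findF_eq_find arr size (size - start).toNat _ _ _ _ (by omega)

-- B's finishing step (flush the open run, then take the max), as the proofs phrase it
def finishB (s : List (Int × List Int) × Int × List Int × Bool) : Int × List Int :=
  pyMaxPair (if s.2.2.2 then dinsert s.1 s.2.1 s.2.2.1 else s.1)

theorem find_alt_eq (arr : List Int) (size : Int) (start : Int)
    (nv : List (Int × List Int)) (p : Int) (v : List Int) :
    find_alt arr size start nv p v =
      finishB ((PySem.List.pyRange start (size + 1) 1).foldl (stepB arr) (nv, p, v, false)) := rfl

-- B's scan, entered with an open run, agrees with A's inner while loop followed by the flush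
theorem scan_run (arr : List Int) (size : Int) (hsz : size < (arr.length : Int)) :
    ∀ (n : Nat) (j : Int) (nv : List (Int × List Int)) (P : Int) (V : List Int),
      (size + 1 - j).toNat ≤ n → -(arr.length : Int) ≤ j →
      finishB ((PySem.List.pyRange j (size + 1) 1).foldl (stepB arr) (nv, P, V, true)) =
        finishB ((PySem.List.pyRange (findRun arr size j P V).1 (size + 1) 1).foldl
          (stepB arr) (dinsert nv (findRun arr size j P V).2.1 (findRun arr size j P V).2.2,
            1, [], false)) := by
  intro n
  induction n with
  | zero =>
      intro j nv P V hn hj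
      rw [findRun_stop arr size j P V (by omega)]
      rw [PySem.List.pyRange_one_eq_nil (a := j) (b := size + 1) (by omega)]
      rfl
  | succ n ih =>
      intro j nv P V hn hj
      by_cases hle : j ≤ size
      · obtain ⟨x, hx⟩ := pyGet?_some_of_bounds arr j hj (by omega)
        by_cases hpos : 0 < x
        · rw [findRun_pos arr size j P V x hle hx hpos]
          rw [PySem.List.pyRange_one_cons (a := j) (b := size + 1) (by omega)]
          simp only [List.foldl_cons, stepB, hx, if_pos hpos]
          exact ih (j + 1) nv (P * x) (V ++ [x]) (by omega) (by omega)
        · rw [findRun_neg arr size j P V x hle hx hpos]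
          conv_rhs => rw [PySem.List.pyRange_one_cons (a := j) (b := size + 1) (by omega)]
          rw [PySem.List.pyRange_one_cons (a := j) (b := size + 1) (by omega)]
          simp [stepB, hx, hpos]
      · rw [findRun_stop arr size j P V hle]
        rw [PySem.List.pyRange_one_eq_nil (a := j) (b := size + 1) (by omega)]
        rfl

-- the main induction: A's recursion = B's scan, on any suffix of the scan
theorem find_eq_alt (arr : List Int) (size : Int) :
    ∀ (n : Nat) (start : Int) (nv : List (Int × List Int)) (p : Int) (v : List Int),
      (size + 1 - start).toNat ≤ n →
      (start ≤ size → -(arr.length : Int) ≤ start ∧ size < (arr.length : Int)) →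
      find arr size start nv p v = find_alt arr size start nv p v := by
  intro n
  induction n with
  | zero =>
      intro start nv p v hle _
      rw [find_stop arr size start nv p v (by omega), find_alt_eq,
        PySem.List.pyRange_one_eq_nil (a := start) (b := size + 1) (by omega)]
      rfl
  | succ n ih =>
      intro start nv p v hle hpre
      by_cases hgt : start > size
      · rw [find_stop arr size start nv p v hgt, find_alt_eq,
          PySem.List.pyRange_one_eq_nil (a := start) (b := size + 1) (by omega)]
        rfl
      · obtain ⟨hlo, hhi⟩ := hpre (by omega)
        obtain ⟨x, hx⟩ := pyGet?_some_of_bounds arr start hlo (by omega)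
        by_cases hpos : 0 < x
        · rw [find_pos arr size start nv p v x hgt hx hpos]
          have hge := findRun_ge arr size (start + 1) (p * x) (v ++ [x])
          rw [ih (findRun arr size (start + 1) (p * x) (v ++ [x])).1
            (dinsert nv (findRun arr size (start + 1) (p * x) (v ++ [x])).2.1
              (findRun arr size (start + 1) (p * x) (v ++ [x])).2.2) 1 []
            (by omega) (fun h => ⟨by omega, hhi⟩)]
          rw [find_alt_eq, find_alt_eq]
          rw [PySem.List.pyRange_one_cons (a := start) (b := size + 1) (by omega)]
          simp only [List.foldl_cons, stepB, hx, if_pos hpos]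
          exact (scan_run arr size hhi (size + 1 - (start + 1)).toNat (start + 1) nv (p * x)
            (v ++ [x]) le_rfl (by omega)).symm
        · rw [find_neg arr size start nv p v x hgt hx hpos]
          rw [ih (start + 1) nv 1 [] (by omega) (fun h => ⟨by omega, hhi⟩)]
          rw [find_alt_eq, find_alt_eq]
          rw [PySem.List.pyRange_one_cons (a := start) (b := size + 1) (by omega)]
          simp [stepB, hx, hpos]

-- ===== VERDICT (by name: the statement is the Claim_ definition above) =====
theorem find_spec : Claim_equal_find := by
  intro arr size start nv p v _ hpre
  unfold Spec_find
  exact find_eq_alt arr size (size + 1 - start).toNat start nv p v le_rfl hpre.1
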